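-- pv_equiv track=rewrite | github.com/yantianqi1/airp2 | utils/validation.py | validate_character_names
-- ===== SOURCE A (Python) =====
-- def validate_character_names(characters, name_map):
--     """
--     Validate that character names are in the normalization map.
--
--     Returns:
--         List of unknown character names
--     """
--     unknown_names = []
--
--     all_known_names = set()
--     for canonical, aliases in name_map.items():
--         all_known_names.add(canonical)
--         all_known_names.update(aliases)
--
--     for char in characters:
--         if char not in all_known_names:
--             unknown_names.append(char)
--
--     return unknown_names
-- ===== SOURCE B (Python) =====
-- def validate_character_names(characters, name_map):
--     """
--     Validate that character names are in the normalization map.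
--
--     Returns:
--         List of unknown character names
--     """
--     unknown_names = []
--     for char in characters:
--         if char in name_map:
--             continue
--         found = False
--         for aliases in name_map.values():
--             if char in aliases:
--                 found = True
--                 break
--         if not found:
--             unknown_names.append(char)
--     return unknown_names
-- ===== Notes on version B (the rewrite author's own statement) =====
-- stated objective: alternative
-- what changed: B drops A's precomputed set of all known names and instead tests each character directly against the map, first against the keys and then by scanning the alias lists with an early break.
import Mathlib
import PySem

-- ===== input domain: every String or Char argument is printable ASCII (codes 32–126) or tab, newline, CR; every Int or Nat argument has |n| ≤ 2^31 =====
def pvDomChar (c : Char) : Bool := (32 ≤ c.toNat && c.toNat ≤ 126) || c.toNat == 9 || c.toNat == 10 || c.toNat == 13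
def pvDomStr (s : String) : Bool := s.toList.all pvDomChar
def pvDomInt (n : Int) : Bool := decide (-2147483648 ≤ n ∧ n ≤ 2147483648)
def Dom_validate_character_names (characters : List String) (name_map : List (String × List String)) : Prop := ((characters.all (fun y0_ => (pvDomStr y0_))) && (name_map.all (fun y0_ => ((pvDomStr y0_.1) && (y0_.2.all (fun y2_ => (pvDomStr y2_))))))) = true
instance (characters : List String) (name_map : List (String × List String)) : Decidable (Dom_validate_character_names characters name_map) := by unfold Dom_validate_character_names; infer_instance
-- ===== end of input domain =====

-- B drops A's precomputed set of all known names and instead tests each character directly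
-- against the map (keys first, then the alias lists, breaking on the first hit): an alternative
-- decomposition, not claimed faster.

-- ===== PORT A =====
def validate_character_names (characters : List String) (name_map : List (String × List String)) : List String :=
  let all_known_names : PySem.Set String :=
    name_map.foldl (fun s kv => PySem.Set.update (PySem.Set.add s kv.1) kv.2) PySem.Set.empty
  characters.foldl
    (fun unknown_names char =>
      if !(PySem.Set.contains all_known_names char) then unknown_names ++ [char]
      else unknown_names) []

-- ===== PORT B =====
def validate_character_names_alt (characters : List String) (name_map : List (String × List String)) : List String :=
  characters.foldl
    (fun unknown_names char =>
      if name_map.any (fun kv => kv.1 == char) then unknown_names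
      else if name_map.any (fun kv => kv.2.contains char) then unknown_names
      else unknown_names ++ [char]) []

-- ===== PRECONDITION & SPEC =====
def Spec_validate_character_names (characters : List String) (name_map : List (String × List String)) (out : List String) : Prop := out = validate_character_names_alt characters name_map
instance (characters : List String) (name_map : List (String × List String)) (out : List String) : Decidable (Spec_validate_character_names characters name_map out) := by unfold Spec_validate_character_names; infer_instance

-- ===== CLAIM (what is proved, stated in full; the proofs are below) =====
def Claim_equal_validate_character_names : Prop := ∀ (characters : List String) (name_map : List (String × List String)), Dom_validate_character_names characters name_map → Spec_validate_character_names characters name_map (validate_character_names characters name_map)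

-- ===== LEMMAS AND PROOFS =====

-- membership in A's accumulated set of known names
theorem mem_known_fold (name_map : List (String × List String)) (s : PySem.Set String) (x : String) :
    x ∈ name_map.foldl (fun s kv => PySem.Set.update (PySem.Set.add s kv.1) kv.2) s ↔
      x ∈ s ∨ ∃ kv ∈ name_map, x = kv.1 ∨ x ∈ kv.2 := by
  induction name_map generalizing s with
  | nil => simp
  | cons kv rest ih =>
    simp only [List.foldl_cons, ih, PySem.Set.mem_update, PySem.Set.mem_add, List.mem_cons]
    constructor
    · rintro (((h | h) | h) | ⟨p, hp, h⟩)
      · exact Or.inl h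
      · exact Or.inr ⟨kv, Or.inl rfl, Or.inl h⟩
      · exact Or.inr ⟨kv, Or.inl rfl, Or.inr h⟩
      · exact Or.inr ⟨p, Or.inr hp, h⟩
    · rintro (h | ⟨p, (rfl | hp), h⟩)
      · exact Or.inl (Or.inl (Or.inl h))
      · rcases h with h | h
        · exact Or.inl (Or.inl (Or.inr h))
        · exact Or.inl (Or.inr h)
      · exact Or.inr ⟨p, hp, h⟩

-- the per-character test of A equals the per-character test of B
theorem contains_known_eq (name_map : List (String × List String)) (x : String) :
    PySem.Set.contains
        (name_map.foldl (fun s kv => PySem.Set.update (PySem.Set.add s kv.1) kv.2) PySem.Set.empty) x =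
      (name_map.any (fun kv => kv.1 == x) || name_map.any (fun kv => kv.2.contains x)) := by
  rw [Bool.eq_iff_iff, PySem.Set.contains_iff, mem_known_fold]
  simp only [PySem.Set.empty, List.not_mem_nil, false_or, Bool.or_eq_true, List.any_eq_true,
    beq_iff_eq, List.contains_eq_mem, decide_eq_true_eq]
  constructor
  · rintro ⟨kv, hkv, rfl | hx⟩
    · exact Or.inl ⟨kv, hkv, rfl⟩
    · exact Or.inr ⟨kv, hkv, hx⟩
  · rintro (⟨kv, hkv, rfl⟩ | ⟨kv, hkv, hx⟩)
    · exact ⟨kv, hkv, Or.inl rfl⟩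
    · exact ⟨kv, hkv, Or.inr hx⟩

-- ===== VERDICT (by name: the statement is the Claim_ definition above) =====
theorem validate_character_names_spec : Claim_equal_validate_character_names := by
  intro characters name_map _
  unfold Spec_validate_character_names validate_character_names validate_character_names_alt
  apply PySem.List.foldl_congr_mem
  intro acc char _
  rw [contains_known_eq name_map char]
  cases h1 : name_map.any (fun kv => kv.1 == char) <;>
    cases h2 : name_map.any (fun kv => kv.2.contains char) <;> simp [h1, h2]
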